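-- pv_equiv track=rewrite | github.com/mikeminneman/stonehenge | detectors.py | detect_hexlike
-- ===== SOURCE A (Python) =====
-- import string
--
-- def detect_hex(text):  # returns boolean
--     if len(text) % 2 != 0:
--         return False
--     if type(text) == bytes:
--         return all(c in bytes(string.hexdigits, encoding='utf-8') for c in text)
--     elif type(text) == str:
--         return all(c in string.hexdigits for c in text)
--     return False
--
-- def detect_hexlike(text):
--     if len(text) % 2 != 0:
--         return False
--     extrachars = '#Vv'
--     if type(text) == bytes:
--         return not (detect_hex(text)) and all(c in bytes(string.hexdigits + extrachars, encoding='utf-8') for c in text)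
--     elif type(text) == str:
--         return not (detect_hex(text)) and all(c in string.hexdigits + extrachars for c in text)
-- ===== SOURCE B (Python) =====
-- import string
--
-- def detect_hexlike(text):
--     if len(text) % 2 != 0:
--         return False
--     extrachars = '#Vv'
--     if type(text) == bytes:
--         valid = bytes(string.hexdigits + extrachars, encoding='utf-8')
--         extras = bytes(extrachars, encoding='utf-8')
--     elif type(text) == str:
--         valid = string.hexdigits + extrachars
--         extras = extrachars
--     else:
--         return None
--     all_valid = True
--     has_extra = False
--     for c in text:
--         if c not in valid:
--             all_valid = False
--         if c in extras:
--             has_extra = True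
--     return all_valid and has_extra
-- ===== Notes on version B (the rewrite author's own statement) =====
-- stated objective: simpler
-- what changed: Replaced the detect_hex helper call plus second full scan with a single pass over the text maintaining two flags (all chars valid, some char is an extra), returning all_valid and has_extra.
import Mathlib
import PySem

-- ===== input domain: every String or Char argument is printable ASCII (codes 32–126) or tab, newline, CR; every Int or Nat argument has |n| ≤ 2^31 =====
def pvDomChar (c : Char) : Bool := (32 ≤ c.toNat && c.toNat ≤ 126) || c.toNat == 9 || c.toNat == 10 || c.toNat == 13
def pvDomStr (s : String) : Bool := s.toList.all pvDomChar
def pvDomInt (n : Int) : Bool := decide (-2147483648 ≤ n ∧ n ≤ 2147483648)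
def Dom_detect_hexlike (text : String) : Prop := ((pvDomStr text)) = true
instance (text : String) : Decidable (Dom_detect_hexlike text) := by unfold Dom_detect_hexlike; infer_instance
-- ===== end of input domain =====

-- B: single pass with two flags instead of A's detect_hex helper plus a second scan; same return value.
-- ===== PORT A =====
def pvHexdigits : List Char := "0123456789abcdefABCDEF".toList

def detect_hex (text : String) : Bool :=
  if text.toList.length % 2 ≠ 0 then false
  else text.toList.all (fun c => pvHexdigits.contains c)

def detect_hexlike (text : String) : Bool :=
  if text.toList.length % 2 ≠ 0 then false
  else
    (!detect_hex text) && text.toList.all (fun c => (pvHexdigits ++ "#Vv".toList).contains c)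

-- ===== PORT B =====
def detect_hexlike_alt (text : String) : Bool :=
  if text.toList.length % 2 ≠ 0 then false
  else
    let valid := pvHexdigits ++ "#Vv".toList
    let extras := "#Vv".toList
    let r := text.toList.foldl (fun (p : Bool × Bool) c =>
      ((if !valid.contains c then false else p.1),
       (if extras.contains c then true else p.2))) (true, false)
    r.1 && r.2

-- ===== PRECONDITION & SPEC =====
def Spec_detect_hexlike (text : String) (out : Bool) : Prop := out = detect_hexlike_alt text
instance (text : String) (out : Bool) : Decidable (Spec_detect_hexlike text out) := by unfold Spec_detect_hexlike; infer_instance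

-- ===== CLAIM (what is proved, stated in full; the proofs are below) =====
def Claim_equal_detect_hexlike : Prop := ∀ (text : String), Dom_detect_hexlike text → Spec_detect_hexlike text (detect_hexlike text)

-- ===== LEMMAS AND PROOFS =====
theorem pv_extra_not_hex (c : Char) (h : ("#Vv".toList).contains c = true) :
    pvHexdigits.contains c = false := by
  have hm : c ∈ "#Vv".toList := by simpa using h
  fin_cases hm <;> decide

theorem pv_hex_of_valid (c : Char)
    (hc : (pvHexdigits ++ "#Vv".toList).contains c = true)
    (h2 : ("#Vv".toList).contains c = false) :
    pvHexdigits.contains c = true := by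
  have hm : c ∈ pvHexdigits ++ "#Vv".toList := by simpa using hc
  rcases List.mem_append.mp hm with hm | hm
  · simpa using hm
  · exact absurd (by simpa using hm) (by simpa using h2)

theorem pv_flags (l : List Char) (av he : Bool) :
    l.foldl (fun (p : Bool × Bool) c =>
      ((if !(pvHexdigits ++ "#Vv".toList).contains c then false else p.1),
       (if ("#Vv".toList).contains c then true else p.2))) (av, he)
    = (av && l.all (fun c => (pvHexdigits ++ "#Vv".toList).contains c),
       he || l.any (fun c => ("#Vv".toList).contains c)) := by
  induction l generalizing av he with
  | nil => simp
  | cons c tl ih =>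
    rw [List.foldl_cons, ih, List.all_cons, List.any_cons]
    cases h : (pvHexdigits ++ "#Vv".toList).contains c <;>
      cases h2 : ("#Vv".toList).contains c <;>
        simp

theorem pv_valid_any (l : List Char)
    (h : l.all (fun c => (pvHexdigits ++ "#Vv".toList).contains c) = true) :
    l.any (fun c => ("#Vv".toList).contains c) = !l.all (fun c => pvHexdigits.contains c) := by
  induction l with
  | nil => rfl
  | cons c tl ih =>
    rw [List.all_cons, Bool.and_eq_true] at h
    rw [List.any_cons, List.all_cons, ih h.2]
    cases h2 : ("#Vv".toList).contains c
    · rw [pv_hex_of_valid c h.1 h2, Bool.true_and, Bool.false_or]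
    · rw [pv_extra_not_hex c h2, Bool.false_and, Bool.not_false, Bool.true_or]

-- ===== VERDICT (by name: the statement is the Claim_ definition above) =====
theorem detect_hexlike_spec : Claim_equal_detect_hexlike := by
  intro text _
  unfold Spec_detect_hexlike
  simp only [detect_hexlike, detect_hexlike_alt, detect_hex]
  rcases Decidable.em (text.toList.length % 2 ≠ 0) with hp | hp
  · rw [if_pos hp, if_pos hp]
  · rw [if_neg hp, if_neg hp, if_neg hp, pv_flags, Bool.true_and, Bool.false_or]
    cases hv : text.toList.all (fun c => (pvHexdigits ++ "#Vv".toList).contains c)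
    · rw [Bool.and_false, Bool.false_and]
    · rw [pv_valid_any _ hv, Bool.and_true, Bool.true_and]
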